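-- pv_equiv track=rewrite | github.com/luke9kim8/QueryGen | sqlfuzz/triage_tpcc.py | roundup_line
-- ===== SOURCE A (Python) =====
-- def roundup_line(line):
--
--     out = ""
--     items = line.split(",")
--     for item in items:
--         if "." in item:
--             item = item.split(".")[0]
--         out += item+","
--     return out[:-1]
-- ===== SOURCE B (Python) =====
-- def roundup_line(line):
--     out = []
--     skip = False
--     for ch in line:
--         if ch == ',':
--             out.append(ch)
--             skip = False
--         elif skip:
--             pass
--         elif ch == '.':
--             skip = True
--         else:
--             out.append(ch)
--     return ''.join(out)
-- ===== Notes on version B (the rewrite author's own statement) =====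
-- stated objective: alternative
-- what changed: B replaces A's split-on-comma / truncate-each-field-at-its-first-dot / rejoin-and-trim pipeline by a single left-to-right character scan with a boolean skip flag (commas clear the flag and are kept, a dot sets it, characters are dropped while it is set), building the output in one pass without any split/join.
import Mathlib
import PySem

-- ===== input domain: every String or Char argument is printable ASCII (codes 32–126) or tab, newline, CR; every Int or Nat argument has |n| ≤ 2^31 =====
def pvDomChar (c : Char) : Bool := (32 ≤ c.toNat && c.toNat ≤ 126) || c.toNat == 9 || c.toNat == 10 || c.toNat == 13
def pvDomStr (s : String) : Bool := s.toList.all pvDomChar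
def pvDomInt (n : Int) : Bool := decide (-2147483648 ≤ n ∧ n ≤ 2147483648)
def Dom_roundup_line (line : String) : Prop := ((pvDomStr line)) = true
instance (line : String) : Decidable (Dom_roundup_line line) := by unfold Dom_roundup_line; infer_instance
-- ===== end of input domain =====

-- B replaces A's split/truncate/rejoin pipeline by one character scan with a skip flag; same cost, no split/join.

-- ===== PORT A =====
-- A: split on ",", truncate each item at its first "." (item.split(".")[0]), append item+",", drop the last char.
-- item.split(".") always returns a nonempty list, so the headD default is never used.
def roundup_line (line : String) : String :=
  let items := PySem.Chars.splitOn line.toList [',']          -- line.split(",")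
  let out := items.foldl (fun out item =>
    let item := if PySem.Chars.isIn ['.'] item then (PySem.Chars.splitOn item ['.']).headD [] else item
    out ++ item ++ [',']) []
  PySem.Str.slice (String.ofList out) none (some (-1))        -- out[:-1]

-- ===== PORT B =====
-- B: single scan; a comma clears the skip flag and is kept, a dot sets it, chars are dropped while it is set.
def roundup_line_alt (line : String) : String :=
  let st := line.toList.foldl (fun (st : List Char × Bool) ch =>
    if ch = ',' then (st.1 ++ [ch], false)
    else if st.2 then st
    else if ch = '.' then (st.1, true)
    else (st.1 ++ [ch], st.2)) ([], false)
  String.ofList st.1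

-- ===== PRECONDITION & SPEC =====
def Spec_roundup_line (line : String) (out : String) : Prop := out = roundup_line_alt line
instance (line : String) (out : String) : Decidable (Spec_roundup_line line out) := by unfold Spec_roundup_line; infer_instance

-- ===== CLAIM (what is proved, stated in full; the proofs are below) =====
def Claim_equal_roundup_line : Prop := ∀ (line : String), Dom_roundup_line line → Spec_roundup_line line (roundup_line line)

-- ===== LEMMAS AND PROOFS =====

-- simple recursive model of splitting on a single character
def pvSplit1 (sep : Char) : List Char → List (List Char)
  | [] => [[]]
  | c :: cs => if c = sep then [] :: pvSplit1 sep cs else (pvSplit1 sep cs).modifyHead (c :: ·)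

theorem pvSplit1_ne_nil (sep : Char) (s : List Char) : pvSplit1 sep s ≠ [] := by
  cases s with
  | nil => simp [pvSplit1]
  | cons c cs =>
    simp only [pvSplit1]
    split
    · simp
    · cases h : pvSplit1 sep cs with
      | nil => exact absurd h (pvSplit1_ne_nil sep cs)
      | cons a t => simp [h]

theorem pvSplitOn_go (sep : Char) :
    ∀ fuel (l cur : List Char) (acc : List (List Char)), l.length < fuel →
      PySem.Chars.splitOn.go [sep] fuel l cur acc
        = acc.reverse ++ (pvSplit1 sep l).modifyHead (cur.reverse ++ ·) := by
  intro fuel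
  induction fuel with
  | zero => intro l cur acc h; omega
  | succ n ih =>
    intro l cur acc h
    cases l with
    | nil => simp [PySem.Chars.splitOn.go, pvSplit1]
    | cons c rest =>
      simp only [PySem.Chars.splitOn.go]
      by_cases hc : c = sep
      · subst hc
        have hpre : List.isPrefixOf [c] (c :: rest) = true := by simp [List.isPrefixOf]
        rw [if_pos hpre]
        have := ih rest [] ((cur.reverse) :: acc) (by simpa using Nat.lt_of_succ_lt_succ h)
        simp only [List.length_cons, List.length_nil, List.drop_succ_cons, List.drop_zero] at this ⊢
        rw [this]
        simp only [pvSplit1, if_pos rfl, List.reverse_cons, List.reverse_nil, List.nil_append,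
          List.modifyHead_cons, List.append_assoc, List.singleton_append]
        have : List.modifyHead (fun x => x) (pvSplit1 c rest) = pvSplit1 c rest := by
          cases pvSplit1 c rest <;> simp
        simp [this]
      · have hpre : List.isPrefixOf [sep] (c :: rest) = false := by
          simp [List.isPrefixOf]; exact fun hh => absurd hh.symm hc
        rw [if_neg (by simp [hpre])]
        have := ih rest (c :: cur) acc (by simpa using Nat.lt_of_succ_lt_succ h)
        rw [this]
        simp only [pvSplit1, if_neg hc]
        cases hsp : pvSplit1 sep rest with
        | nil => exact absurd hsp (pvSplit1_ne_nil sep rest)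
        | cons a t => simp

theorem pvSplitOn_eq (sep : Char) (s : List Char) :
    PySem.Chars.splitOn s [sep] = pvSplit1 sep s := by
  unfold PySem.Chars.splitOn
  rw [pvSplitOn_go sep (s.length + 1) s [] [] (by omega)]
  cases h : pvSplit1 sep s with
  | nil => exact absurd h (pvSplit1_ne_nil sep s)
  | cons a t => simp

-- truncation at the first dot
theorem pvSplit1_headD (sep : Char) (s : List Char) :
    (pvSplit1 sep s).headD [] = s.takeWhile (· ≠ sep) := by
  induction s with
  | nil => simp [pvSplit1]
  | cons c cs ih =>
    simp only [pvSplit1]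
    by_cases hc : c = sep
    · subst hc; simp [List.takeWhile_cons]
    · rw [if_neg hc]
      cases h : pvSplit1 sep cs with
      | nil => exact absurd h (pvSplit1_ne_nil sep cs)
      | cons a t =>
        rw [h] at ih
        simp only [List.modifyHead, List.headD_cons]
        simp only [List.headD_cons] at ih
        simp [List.takeWhile_cons, hc, ih]

theorem takeWhile_of_not_mem (sep : Char) (s : List Char) (h : sep ∉ s) :
    s.takeWhile (· ≠ sep) = s := by
  induction s with
  | nil => simp
  | cons c cs ih =>
    simp only [List.mem_cons, not_or] at h
    have hcs : c ≠ sep := fun e => h.1 e.symm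
    rw [List.takeWhile_cons, if_pos (by simp [hcs]), ih h.2]

theorem isIn_singleton (c : Char) (s : List Char) :
    PySem.Chars.isIn [c] s = true ↔ c ∈ s := by
  rw [PySem.Chars.isIn_iff_infix]
  constructor
  · intro h; exact h.subset (by simp)
  · intro h
    obtain ⟨l₁, l₂, rfl⟩ := List.append_of_mem h
    exact ⟨l₁, l₂, by simp⟩

-- A's per-item transformation is takeWhile (· ≠ '.')
theorem truncIf_eq (item : List Char) :
    (if PySem.Chars.isIn ['.'] item then (PySem.Chars.splitOn item ['.']).headD [] else item)
      = item.takeWhile (· ≠ '.') := by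
  by_cases h : '.' ∈ item
  · rw [if_pos ((isIn_singleton _ _).2 h), pvSplitOn_eq, pvSplit1_headD]
  · rw [if_neg (by simp [isIn_singleton, h]), takeWhile_of_not_mem _ _ h]

-- A's fold builds the flatMap of truncated fields, each followed by a comma
theorem foldA_eq (items : List (List Char)) : ∀ (out : List Char),
    items.foldl (fun out item =>
      let item := if PySem.Chars.isIn ['.'] item then (PySem.Chars.splitOn item ['.']).headD [] else item
      out ++ item ++ [',']) out
    = out ++ items.flatMap (fun f => f.takeWhile (· ≠ '.') ++ [',']) := by
  induction items with
  | nil => intro out; simp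
  | cons i is ih =>
    intro out
    simp only [List.foldl_cons, List.flatMap_cons, ih]
    rw [truncIf_eq]
    simp

-- the "joined" shape of the result, as a recursion over the fields
def pvJoin : List (List Char) → List Char
  | [] => []
  | [f] => f.takeWhile (· ≠ '.')
  | f :: g :: rest => f.takeWhile (· ≠ '.') ++ ',' :: pvJoin (g :: rest)

def pvJoinSkip : List (List Char) → List Char
  | [] => []
  | [_] => []
  | _ :: g :: rest => ',' :: pvJoin (g :: rest)

theorem flatMap_dropLast_eq_pvJoin (fields : List (List Char)) :
    (fields.flatMap (fun f => f.takeWhile (· ≠ '.') ++ [','])).dropLast = pvJoin fields := by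
  induction fields with
  | nil => simp [pvJoin]
  | cons f rest ih =>
    cases rest with
    | nil => simp [pvJoin, List.dropLast_concat]
    | cons g t =>
      have hne : (g :: t).flatMap (fun f => f.takeWhile (· ≠ '.') ++ [',']) ≠ [] := by
        simp [List.flatMap_cons]
      rw [List.flatMap_cons, List.dropLast_append_of_ne_nil hne, ih]
      simp [pvJoin]

-- B's scan, modelled structurally
def pvScan : List Char → Bool → List Char
  | [], _ => []
  | c :: cs, skip =>
    if c = ',' then c :: pvScan cs false
    else if skip then pvScan cs skip
    else if c = '.' then pvScan cs true
    else c :: pvScan cs skip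

theorem foldB_eq (cs : List Char) : ∀ (out : List Char) (skip : Bool),
    (cs.foldl (fun (st : List Char × Bool) ch =>
      if ch = ',' then (st.1 ++ [ch], false)
      else if st.2 then st
      else if ch = '.' then (st.1, true)
      else (st.1 ++ [ch], st.2)) (out, skip)).1
    = out ++ pvScan cs skip := by
  induction cs with
  | nil => intro out skip; simp [pvScan]
  | cons c cs ih =>
    intro out skip
    simp only [List.foldl_cons, pvScan]
    by_cases hc : c = ','
    · simp [hc, ih]
    · rw [if_neg hc, if_neg hc]
      by_cases hs : skip = true
      · subst hs; simp [ih]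
      · replace hs : skip = false := by simpa using hs
        subst hs
        simp only [if_neg (by simp : ¬ (false = true))]
        by_cases hd : c = '.'
        · simp [hd, ih]
        · simp [hd, ih]

-- core: the scan equals the join of the comma-split fields truncated at their first dot
theorem pvScan_eq (s : List Char) :
    pvScan s false = pvJoin (pvSplit1 ',' s) ∧ pvScan s true = pvJoinSkip (pvSplit1 ',' s) := by
  induction s with
  | nil => simp [pvScan, pvSplit1, pvJoin, pvJoinSkip]
  | cons c cs ih =>
    obtain ⟨ih₁, ih₂⟩ := ih
    by_cases hc : c = ','
    · subst hc
      simp only [pvScan, if_pos rfl, pvSplit1, if_pos rfl]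
      cases hM : pvSplit1 ',' cs with
      | nil => exact absurd hM (pvSplit1_ne_nil ',' cs)
      | cons m ms =>
        rw [hM] at ih₁
        constructor
        · simp [pvJoin, ih₁]
        · simp [pvJoinSkip, ih₁]
    · cases hM : pvSplit1 ',' cs with
      | nil => exact absurd hM (pvSplit1_ne_nil ',' cs)
      | cons m ms =>
        rw [hM] at ih₁ ih₂
        have hsplit : pvSplit1 ',' (c :: cs) = (c :: m) :: ms := by
          simp [pvSplit1, hc, hM]
        by_cases hd : c = '.'
        · subst hd
          have h1 : pvScan ('.' :: cs) false = pvScan cs true := by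
            simp [pvScan, hc]
          have h2 : pvScan ('.' :: cs) true = pvScan cs true := by
            simp [pvScan, hc]
          rw [h1, h2, hsplit, ih₂]
          cases ms with
          | nil => simp [pvJoin, pvJoinSkip, List.takeWhile_cons]
          | cons g t => simp [pvJoin, pvJoinSkip, List.takeWhile_cons]
        · have h1 : pvScan (c :: cs) false = c :: pvScan cs false := by
            simp [pvScan, hc, hd]
          have h2 : pvScan (c :: cs) true = pvScan cs true := by
            simp [pvScan, hc]
          rw [h1, h2, hsplit, ih₁, ih₂]
          cases ms with
          | nil => simp [pvJoin, pvJoinSkip, List.takeWhile_cons, hd]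
          | cons g t => simp [pvJoin, pvJoinSkip, List.takeWhile_cons, hd]

-- [:-1] is dropLast
theorem slice_neg_one (l : List Char) :
    (PySem.Str.slice (String.ofList l) none (some (-1))).toList = l.dropLast := by
  rw [PySem.Str.slice_to_neg_one]
  simp

theorem toList_roundup_line (line : String) :
    (roundup_line line).toList = pvJoin (pvSplit1 ',' line.toList) := by
  unfold roundup_line
  simp only [foldA_eq, List.nil_append, slice_neg_one]
  rw [pvSplitOn_eq, flatMap_dropLast_eq_pvJoin]

theorem toList_roundup_line_alt (line : String) :
    (roundup_line_alt line).toList = pvJoin (pvSplit1 ',' line.toList) := by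
  unfold roundup_line_alt
  simp only [foldB_eq, List.nil_append]
  rw [(pvScan_eq line.toList).1]
  simp

-- ===== VERDICT (by name: the statement is the Claim_ definition above) =====
theorem roundup_line_spec : Claim_equal_roundup_line := by
  intro line _
  unfold Spec_roundup_line
  have h := (toList_roundup_line line).trans (toList_roundup_line_alt line).symm
  exact String.toList_inj.mp h
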